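-- pv_equiv track=rewrite | github.com/TheLastManStandin/myLeetCode | leetcodePython/756.py | calc_possible_letters_above
-- ===== SOURCE A (Python) =====
-- def calc_possible_letters_above(row: str, allowed: list()):
--   # Проходим по основанию по 2 буквы, сравниваем их с каждым основанием allowed
--   possible_letters_above = list()
--
--   for bottom_two_index in range(len(row) - 1):
--     row_two = row[bottom_two_index:bottom_two_index + 2]
--     list_of_possible_letters_above_bottom_two = list()
--
--     for allowed_two_index in range(len(allowed)):
--       allowed_two = allowed[allowed_two_index][:2]
--
--       if row_two == allowed_two:
--         if allowed[allowed_two_index][2] not in list_of_possible_letters_above_bottom_two: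
--           list_of_possible_letters_above_bottom_two.append(allowed[allowed_two_index][2])
--
--     possible_letters_above.append(list_of_possible_letters_above_bottom_two)
--
--   return possible_letters_above
-- ===== SOURCE B (Python) =====
-- def calc_possible_letters_above(row: str, allowed: list()):
--   # One pass over allowed builds prefix -> ordered deduped third letters; one lookup per pair.
--   above = {}
--   for a in allowed:
--     if len(a) >= 3:
--       bucket = above.setdefault(a[:2], [])
--       if a[2] not in bucket:
--         bucket.append(a[2])
--   return [list(above.get(row[i:i + 2], [])) for i in range(len(row) - 1)]
-- ===== Notes on version B (the rewrite author's own statement) =====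
-- stated objective: faster
-- what changed: B replaces A's inner scan of allowed for every adjacent pair by a dict from 2-char prefix to its ordered deduped third letters, built in one pass, with one lookup per pair.
import Mathlib
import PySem

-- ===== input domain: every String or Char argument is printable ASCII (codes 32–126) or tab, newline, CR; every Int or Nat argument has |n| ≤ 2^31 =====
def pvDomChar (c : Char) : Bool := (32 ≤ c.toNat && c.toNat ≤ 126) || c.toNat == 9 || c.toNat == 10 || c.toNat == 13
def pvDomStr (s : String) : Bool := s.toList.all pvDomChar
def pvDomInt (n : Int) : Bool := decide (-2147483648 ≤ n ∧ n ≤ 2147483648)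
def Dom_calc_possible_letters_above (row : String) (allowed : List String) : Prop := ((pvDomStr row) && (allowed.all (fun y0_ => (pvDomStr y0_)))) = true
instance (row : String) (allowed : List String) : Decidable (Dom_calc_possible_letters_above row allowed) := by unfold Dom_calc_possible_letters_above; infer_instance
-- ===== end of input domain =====

-- B replaces A's per-pair scan of allowed by a dict prefix -> ordered deduped third letters built once (asymptotically faster).

-- ===== PORT A =====
-- inner loop: for allowed_two_index in range(len(allowed)): … (iterating the list = indexing by range; exact)
-- allowed[j][:2] is take 2 (slice with nonneg bounds, exact); allowed[j][2] is pyGet?; none = IndexError, excluded by Pre_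
def pvInnerA (rowTwo : List Char) (allowed : List String) : List String :=
  allowed.foldl (fun acc s =>
    let allowedTwo := s.toList.take 2
    if rowTwo = allowedTwo then
      match PySem.List.pyGet? s.toList 2 with
      | none => acc          -- IndexError in Python; unreachable under Pre_
      | some c =>
        if String.ofList [c] ∈ acc then acc else acc ++ [String.ofList [c]]
    else acc) []

-- outer loop: for bottom_two_index in range(len(row) - 1); row[i:i+2] = (drop i).take 2 (slice_natCast_add, exact)
def calc_possible_letters_above (row : String) (allowed : List String) : List (List String) :=
  (List.range (row.toList.length - 1)).foldl (fun out i =>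
    out ++ [pvInnerA ((row.toList.drop i).take 2) allowed]) []

-- ===== PORT B =====
def pvBuildB (allowed : List String) : PySem.Dict String (List String) :=
  allowed.foldl (fun d s =>
    if 3 ≤ s.toList.length then
      let k := String.ofList (s.toList.take 2)
      let c := String.ofList (s.toList.drop 2 |>.take 1)   -- a[2] as a 1-char string (in range since len ≥ 3)
      let bucket := d.getD k []
      if c ∈ bucket then d else d.insert k (bucket ++ [c])
    else d) PySem.Dict.empty

def calc_possible_letters_above_alt (row : String) (allowed : List String) : List (List String) :=
  let d := pvBuildB allowed
  (List.range (row.toList.length - 1)).map (fun i =>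
    d.getD (String.ofList ((row.toList.drop i).take 2)) [])

-- ===== PRECONDITION & SPEC =====
-- Pre_ excludes exactly the inputs where A raises IndexError: some adjacent pair of row
-- equals an allowed string of length exactly 2 (allowed[i][2] is then out of range).
def Pre_calc_possible_letters_above (row : String) (allowed : List String) : Prop :=
  ∀ s ∈ allowed, s.toList.length = 2 →
    ∀ i ∈ List.range (row.toList.length - 1), (row.toList.drop i).take 2 ≠ s.toList
instance (row : String) (allowed : List String) : Decidable (Pre_calc_possible_letters_above row allowed) := by unfold Pre_calc_possible_letters_above; infer_instance

def pvWitness_calc_possible_letters_above : String × List String := ("abc", ["abd", "bca", "abd", "xx"])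

def Spec_calc_possible_letters_above (row : String) (allowed : List String) (out : List (List String)) : Prop := out = calc_possible_letters_above_alt row allowed
instance (row : String) (allowed : List String) (out : List (List String)) : Decidable (Spec_calc_possible_letters_above row allowed out) := by unfold Spec_calc_possible_letters_above; infer_instance

-- ===== CLAIM (what is proved, stated in full; the proofs are below) =====
def Claim_equal_calc_possible_letters_above : Prop := ∀ (row : String) (allowed : List String), Dom_calc_possible_letters_above row allowed → Pre_calc_possible_letters_above row allowed → Spec_calc_possible_letters_above row allowed (calc_possible_letters_above row allowed)


-- ===== LEMMAS AND PROOFS =====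

-- String.ofList is injective (read keys back through toList)
lemma pvOfList_inj {a b : List Char} (h : String.ofList a = String.ofList b) : a = b := by
  simpa using congrArg String.toList h

-- a fold that appends singletons is a map
lemma pvFoldl_append_map {α β : Type} (l : List α) (f : α → β) (acc : List β) :
    l.foldl (fun out i => out ++ [f i]) acc = acc ++ l.map f := by
  induction l generalizing acc with
  | nil => simp
  | cons x xs ih => simp [List.foldl, ih]

-- generalized invariant: the inner accumulator is always the dict's bucket at key t
lemma pvInner_gen (t : List Char) (ht : t.length = 2) :
    ∀ (allowed : List String) (acc : List String) (d : PySem.Dict String (List String)),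
      (∀ s ∈ allowed, s.toList.length = 2 → t ≠ s.toList) →
      acc = d.getD (String.ofList t) [] →
      allowed.foldl (fun acc s =>
        let allowedTwo := s.toList.take 2
        if t = allowedTwo then
          match PySem.List.pyGet? s.toList 2 with
          | none => acc
          | some c =>
            if String.ofList [c] ∈ acc then acc else acc ++ [String.ofList [c]]
        else acc) acc
      = (allowed.foldl (fun d s =>
          if 3 ≤ s.toList.length then
            let k := String.ofList (s.toList.take 2)
            let c := String.ofList (s.toList.drop 2 |>.take 1)
            let bucket := d.getD k []
            if c ∈ bucket then d else d.insert k (bucket ++ [c])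
          else d) d).getD (String.ofList t) [] := by
  intro allowed
  induction allowed with
  | nil => intro acc d _ hacc; simpa using hacc
  | cons s rest ih =>
    intro acc d hx hacc
    simp only [List.foldl_cons]
    by_cases hm : t = s.toList.take 2
    · -- prefix matches: s has length ≥ 2; length = 2 is excluded, so length ≥ 3
      have hlen2 : 2 ≤ s.toList.length := by
        have := congrArg List.length hm
        rw [ht, List.length_take] at this
        omega
      have hsl : s.toList.length = s.length := by simp
      have hlen3 : 3 ≤ s.toList.length := by
        rcases Nat.lt_or_ge s.toList.length 3 with h3 | h3
        · exfalso
          have heq2 : s.toList.length = 2 := by omega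
          have htself : t = s.toList := by
            rw [hm, List.take_of_length_le (by omega)]
          exact hx s (List.mem_cons_self) heq2 htself
        · exact h3
      have hlen3' : 3 ≤ s.length := by omega
      -- the indexed char exists
      have hget : PySem.List.pyGet? s.toList 2 = some (s.toList.drop 2).head! := by
        have hd : s.toList.drop 2 ≠ [] := by
          intro h
          have := congrArg List.length h
          simp at this
          omega
        rcases List.exists_cons_of_ne_nil hd with ⟨c, cs, hcs⟩
        simp [PySem.List.pyGet?, PySem.List.pyIdx?]
        split_ifs with hc
        · simp only [Option.bind_some]
          rw [← List.head?_drop, hcs]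
          simp
        · exfalso; push_cast at hc; omega
      have htake1 : (s.toList.drop 2).take 1 = [(s.toList.drop 2).head!] := by
        have hd : s.toList.drop 2 ≠ [] := by
          intro h
          have := congrArg List.length h
          simp at this
          omega
        rcases List.exists_cons_of_ne_nil hd with ⟨c, cs, hcs⟩
        simp [hcs]
      rw [hget]
      simp only [if_pos hlen3, htake1, ← hm]
      set c := (s.toList.drop 2).head! with hc
      rw [← hacc]
      by_cases hmem : String.ofList [c] ∈ acc
      · simp only [if_pos hmem]
        exact ih acc d (fun s hs => hx s (List.mem_cons_of_mem _ hs)) hacc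
      · simp only [if_neg hmem]
        apply ih
        · exact fun s hs => hx s (List.mem_cons_of_mem _ hs)
        · simp [PySem.Dict.getD_insert_self, hacc]
    · -- prefix differs: A's acc unchanged; B's bucket at key t unchanged
      simp only [if_neg hm]
      apply ih _ _ (fun s hs => hx s (List.mem_cons_of_mem _ hs))
      by_cases h3 : 3 ≤ s.toList.length
      · simp only [if_pos h3]
        have hne : String.ofList t ≠ String.ofList (s.toList.take 2) := by
          intro h; exact hm (pvOfList_inj h)
        split
        · exact hacc
        · rw [PySem.Dict.getD_insert, if_neg hne]; exact hacc
      · simp only [if_neg h3]; exact hacc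

lemma pvInner_eq_lookup (allowed : List String) (t : List Char)
    (ht : t.length = 2)
    (hx : ∀ s ∈ allowed, s.toList.length = 2 → t ≠ s.toList) :
    pvInnerA t allowed = (pvBuildB allowed).getD (String.ofList t) [] := by
  unfold pvInnerA pvBuildB
  exact pvInner_gen t ht allowed [] PySem.Dict.empty hx (by simp [PySem.Dict.getD_empty])

theorem calc_possible_letters_above_spec : Claim_equal_calc_possible_letters_above := by
  intro row allowed _ hpre
  unfold Spec_calc_possible_letters_above calc_possible_letters_above calc_possible_letters_above_alt
  rw [pvFoldl_append_map]
  simp only [List.nil_append]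
  apply List.map_congr_left
  intro i hi
  have hi' : i < row.toList.length - 1 := List.mem_range.mp hi
  apply pvInner_eq_lookup
  · rw [List.length_take, List.length_drop]; omega
  · intro s hs hlen heq
    exact hpre s hs hlen i hi heq
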